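-- pv_equiv track=rewrite | github.com/TheJim123/Projekt-Tomo-vaje | resitve/zanke.py | ravninski
-- ===== SOURCE A (Python) =====
-- def ravninski(sprehod):
--     i = 0
--     j = 0
--     for sign in sprehod:
--         if sign == "S":
--             j += 1
--         elif sign == "J":
--             j -= 1
--         elif sign == "V":
--             i += 1
--         elif sign == "Z":
--             i -= 1
--     return (i, j)
-- ===== SOURCE B (Python) =====
-- def ravninski(sprehod):
--     return (sprehod.count("V") - sprehod.count("Z"),
--             sprehod.count("S") - sprehod.count("J"))
-- ===== Notes on version B (the rewrite author's own statement) =====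
-- stated objective: idiomatic
-- what changed: Replaces the branching accumulator loop with a closed-form pair of coordinates computed from four str.count scans (V-Z, S-J).
import Mathlib
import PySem

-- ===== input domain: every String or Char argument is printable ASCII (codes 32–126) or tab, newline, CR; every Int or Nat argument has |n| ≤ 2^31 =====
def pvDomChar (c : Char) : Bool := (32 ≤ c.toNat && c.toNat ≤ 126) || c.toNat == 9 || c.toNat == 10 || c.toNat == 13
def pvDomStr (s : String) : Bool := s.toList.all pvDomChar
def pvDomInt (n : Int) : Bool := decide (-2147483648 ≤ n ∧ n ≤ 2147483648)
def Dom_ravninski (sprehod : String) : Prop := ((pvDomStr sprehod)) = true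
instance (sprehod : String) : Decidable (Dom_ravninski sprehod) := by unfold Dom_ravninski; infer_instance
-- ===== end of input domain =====

-- B replaces A's branching accumulator loop with four str.count scans (idiomatic closed form).

-- ===== PORT A =====
def ravninskiLoop : List Char → Int → Int → Int × Int
  | [], i, j => (i, j)
  | c :: rest, i, j =>
    if c = 'S' then ravninskiLoop rest i (j + 1)
    else if c = 'J' then ravninskiLoop rest i (j - 1)
    else if c = 'V' then ravninskiLoop rest (i + 1) j
    else if c = 'Z' then ravninskiLoop rest (i - 1) j
    else ravninskiLoop rest i j

def ravninski (sprehod : String) : Int × Int :=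
  ravninskiLoop sprehod.toList 0 0

-- ===== PORT B =====
def ravninski_alt (sprehod : String) : Int × Int :=
  ((PySem.Str.count sprehod "V" : Int) - (PySem.Str.count sprehod "Z" : Int),
   (PySem.Str.count sprehod "S" : Int) - (PySem.Str.count sprehod "J" : Int))

-- ===== PRECONDITION & SPEC =====
def Spec_ravninski (sprehod : String) (out : Int × Int) : Prop := out = ravninski_alt sprehod
instance (sprehod : String) (out : Int × Int) : Decidable (Spec_ravninski sprehod out) := by unfold Spec_ravninski; infer_instance

-- ===== CLAIM (what is proved, stated in full; the proofs are below) =====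
def Claim_equal_ravninski : Prop := ∀ (sprehod : String), Dom_ravninski sprehod → Spec_ravninski sprehod (ravninski sprehod)

-- ===== LEMMAS AND PROOFS =====

-- PySem.Chars.count on a single-character needle is List.count
theorem chars_count_go_singleton (c : Char) (s : List Char) (fuel : Nat) (acc : Nat)
    (h : s.length ≤ fuel) :
    PySem.Chars.count.go [c] fuel s acc = acc + s.count c := by
  induction s generalizing fuel acc with
  | nil =>
    cases fuel <;> simp [PySem.Chars.count.go]
  | cons x t ih =>
    cases fuel with
    | zero => simp at h
    | succ f =>
      simp only [PySem.Chars.count.go]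
      by_cases hx : x = c
      · subst hx
        simp only [List.isPrefixOf, BEq.rfl, Bool.true_and, if_true,
          List.length_cons, List.length_nil, List.drop_succ_cons, List.drop_zero]
        rw [ih _ _ (by simpa using h), List.count_cons]
        simp only [BEq.rfl, if_true]
        omega
      · have : ([c].isPrefixOf (x :: t)) = false := by
          simp [List.isPrefixOf]
          exact fun hc => (hx hc.symm).elim
        rw [this, if_neg (by simp)]
        rw [ih _ _ (by simpa using h), List.count_cons]
        simp [hx]

theorem chars_count_singleton (c : Char) (s : List Char) :
    PySem.Chars.count s [c] = s.count c := by
  simp only [PySem.Chars.count, List.isEmpty_cons, if_false, Bool.false_eq_true]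
  simpa using chars_count_go_singleton c s s.length 0 le_rfl

theorem ravninskiLoop_eq (s : List Char) (i j : Int) :
    ravninskiLoop s i j =
      (i + (s.count 'V' : Int) - (s.count 'Z' : Int),
       j + (s.count 'S' : Int) - (s.count 'J' : Int)) := by
  induction s generalizing i j with
  | nil => simp [ravninskiLoop]
  | cons c t ih =>
    simp only [ravninskiLoop]
    split_ifs with h1 h2 h3 h4 <;>
      subst_vars <;>
      rw [ih] <;>
      simp [Prod.ext_iff, *] <;>
      omega

-- ===== VERDICT (by name: the statement is the Claim_ definition above) =====
theorem ravninski_spec : Claim_equal_ravninski := by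
  intro s _
  show ravninski s = ravninski_alt s
  unfold ravninski ravninski_alt
  rw [ravninskiLoop_eq]
  have hV : "V".toList = ['V'] := rfl
  have hZ : "Z".toList = ['Z'] := rfl
  have hS : "S".toList = ['S'] := rfl
  have hJ : "J".toList = ['J'] := rfl
  simp [PySem.Str.count_eq, hV, hZ, hS, hJ, chars_count_singleton]
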